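-- pv_equiv track=rewrite | github.com/rl-institut/WEFESiteAnalyst | DAT_src/preprocessing/utils.py | convert_usage_windows
-- ===== SOURCE A (Python) =====
-- def convert_usage_windows(input_dict):
--     # standard usage windows definition
--     usage_windows = []
--     start_time = None
--
--     for window, active in input_dict.items():
--         hour_range = window.split('-')
--         if active:
--             if start_time is None:
--                 start_time = int(hour_range[0])
--         elif start_time is not None:
--             end_time = int(hour_range[0])
--             usage_windows.append([start_time, end_time])
--             start_time = None
--     if start_time is not None:
--         # If there's an active window at the end of the day
--         # assume it ends at midnight (24)
--         usage_windows.append([start_time, 24])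
--
--     return usage_windows
-- ===== SOURCE B (Python) =====
-- def convert_usage_windows(input_dict):
--     # staged passes: zip each item with its predecessor's flag to detect rising and
--     # falling edges as two separate lists, pad the ends with 24 if the day ends active,
--     # then pair starts with ends positionally
--     items = list(input_dict.items())
--     prev_flags = [False] + [a for _, a in items][:-1]
--     starts = [int(w.split('-')[0]) for (w, a), p in zip(items, prev_flags) if a and not p]
--     ends = [int(w.split('-')[0]) for (w, a), p in zip(items, prev_flags) if (not a) and p]
--     if len(ends) < len(starts):
--         ends = ends + [24]
--     return [[s, e] for s, e in zip(starts, ends)]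
-- ===== Notes on version B (the rewrite author's own statement) =====
-- stated objective: alternative
-- what changed: B replaces A's single stateful pass (an Optional start_time threaded through the loop, appending on transitions) by staged declarative passes: it zips each entry with its predecessor's flag, extracts the rising-edge hours and the falling-edge hours as two independent lists, pads the end list with 24 when the day ends active, and zips the two lists positionally into intervals.
import Mathlib
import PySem

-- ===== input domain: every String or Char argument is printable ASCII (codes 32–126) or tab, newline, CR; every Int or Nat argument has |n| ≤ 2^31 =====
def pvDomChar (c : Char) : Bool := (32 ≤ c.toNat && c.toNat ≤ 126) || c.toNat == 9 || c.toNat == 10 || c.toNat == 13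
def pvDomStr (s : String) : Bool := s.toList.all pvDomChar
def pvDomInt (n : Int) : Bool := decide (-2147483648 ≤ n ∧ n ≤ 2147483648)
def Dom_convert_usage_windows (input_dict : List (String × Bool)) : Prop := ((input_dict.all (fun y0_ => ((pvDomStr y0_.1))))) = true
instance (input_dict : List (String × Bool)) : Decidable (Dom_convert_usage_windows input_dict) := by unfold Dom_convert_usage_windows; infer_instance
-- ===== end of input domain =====

-- B replaces A's stateful single pass by staged passes: zip each entry with its
-- predecessor's flag, collect rising-edge and falling-edge hours as two lists,
-- pad with 24, and zip them into intervals (alternative decomposition, same cost).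


-- shared helper: int(window.split('-')[0]); the defaults are only reached where Python
-- raises ValueError, i.e. outside Pre_ (split of a nonempty separator is never empty)
def pvHour (w : String) : Int :=
  (PySem.Int.ofStr? (((PySem.Str.split? w "-").getD []).headD "")).getD 0

-- ===== PORT A =====
-- dict parameter: Python builds the dict from the pairs (last value wins, first position kept)
def convert_usage_windows (input_dict : List (String × Bool)) : List (List Int) :=
  let st := (PySem.Dict.ofList input_dict).items.foldl
    (fun (s : List (List Int) × Option Int) wa =>
      if wa.2 then
        match s.2 with
        | none => (s.1, some (pvHour wa.1))
        | some _ => s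
      else
        match s.2 with
        | some start_time => (s.1 ++ [[start_time, pvHour wa.1]], none)
        | none => s)
    ([], none)
  match st.2 with
  | some start_time => st.1 ++ [[start_time, 24]]
  | none => st.1

-- ===== PORT B =====
def convert_usage_windows_alt (input_dict : List (String × Bool)) : List (List Int) :=
  let items := (PySem.Dict.ofList input_dict).items
  -- prev_flags = [False] + flags[:-1]
  let prev_flags := false :: (items.map (·.2)).dropLast
  -- rising edges: active now, predecessor inactive
  let starts := (items.zip prev_flags).filterMap
    (fun x => if x.1.2 && !x.2 then some (pvHour x.1.1) else none)
  -- falling edges: inactive now, predecessor active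
  let ends := (items.zip prev_flags).filterMap
    (fun x => if !x.1.2 && x.2 then some (pvHour x.1.1) else none)
  let ends := if ends.length < starts.length then ends ++ [24] else ends
  (starts.zip ends).map (fun p => [p.1, p.2])

-- ===== PRECONDITION & SPEC =====
-- Exactly the inputs on which A (and B) return: every key of the dict at a run boundary —
-- where the active flag differs from the previous entry's flag (the flag before the first
-- entry reading as inactive) — has an int()-parseable part before its first '-'. Only those
-- keys are ever passed to int(); elsewhere Python raises ValueError.
def Pre_convert_usage_windows (input_dict : List (String × Bool)) : Prop :=
  let items := (PySem.Dict.ofList input_dict).items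
  ∀ p ∈ List.zip (false :: items.map (·.2)) items,
    p.1 ≠ p.2.2 →
      (PySem.Int.ofStr? (((PySem.Str.split? p.2.1 "-").getD []).headD "")).isSome = true
instance (input_dict : List (String × Bool)) : Decidable (Pre_convert_usage_windows input_dict) := by
  unfold Pre_convert_usage_windows; infer_instance
def pvWitness_convert_usage_windows : (List (String × Bool)) :=
  [("3-4", true), ("9-10", false)]
def Spec_convert_usage_windows (input_dict : List (String × Bool)) (out : List (List Int)) : Prop := out = convert_usage_windows_alt input_dict
instance (input_dict : List (String × Bool)) (out : List (List Int)) : Decidable (Spec_convert_usage_windows input_dict out) := by unfold Spec_convert_usage_windows; infer_instance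

-- ===== CLAIM (what is proved, stated in full; the proofs are below) =====
def Claim_equal_convert_usage_windows : Prop := ∀ (input_dict : List (String × Bool)), Dom_convert_usage_windows input_dict → Pre_convert_usage_windows input_dict → Spec_convert_usage_windows input_dict (convert_usage_windows input_dict)

-- ===== LEMMAS AND PROOFS =====
-- reference run-recursion used only as a proof intermediate between the two ports
mutual
def pvScan : List (String × Bool) → List (List Int)
  | [] => []
  | (_, false) :: rest => pvScan rest
  | (w, true) :: rest => pvRun (pvHour w) rest
def pvRun (begin_ : Int) : List (String × Bool) → List (List Int)
  | [] => [[begin_, 24]]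
  | (_, true) :: rest => pvRun begin_ rest
  | (w, false) :: rest => [begin_, pvHour w] :: pvScan rest
end

-- A's loop body and the trailing flush, as standalone functions of the state
def pvStep (s : List (List Int) × Option Int) (wa : String × Bool) : List (List Int) × Option Int :=
  if wa.2 then
    match s.2 with
    | none => (s.1, some (pvHour wa.1))
    | some _ => s
  else
    match s.2 with
    | some start_time => (s.1 ++ [[start_time, pvHour wa.1]], none)
    | none => s

def pvFinish (s : List (List Int) × Option Int) : List (List Int) :=
  match s.2 with
  | some start_time => s.1 ++ [[start_time, 24]]
  | none => s.1

-- loop invariant: A's fold from state (acc, none) flushes to acc ++ pvScan l, and from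
-- (acc, some t) to acc ++ pvRun t l
theorem pvLoop (l : List (String × Bool)) :
    (∀ acc, pvFinish (l.foldl pvStep (acc, none)) = acc ++ pvScan l) ∧
    (∀ acc t, pvFinish (l.foldl pvStep (acc, some t)) = acc ++ pvRun t l) := by
  induction l with
  | nil => exact ⟨fun acc => by simp [pvFinish, pvScan], fun acc t => by simp [pvFinish, pvRun]⟩
  | cons p rest ih =>
    obtain ⟨w, a⟩ := p
    cases a with
    | false =>
      refine ⟨fun acc => ?_, fun acc t => ?_⟩
      · simpa [pvStep, pvScan] using ih.1 acc
      · simp only [List.foldl_cons, pvStep]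
        simpa [pvRun, List.append_assoc] using ih.1 (acc ++ [[t, pvHour w]])
    | true =>
      refine ⟨fun acc => ?_, fun acc t => ?_⟩
      · simpa [pvStep, pvScan] using ih.2 acc (pvHour w)
      · simpa [pvStep, pvRun] using ih.2 acc t

-- recursive characterisations of B's two edge comprehensions (parametrised by the
-- predecessor flag p)
def edgesS (p : Bool) : List (String × Bool) → List Int
  | [] => []
  | (w, a) :: r => if a && !p then pvHour w :: edgesS a r else edgesS a r

def edgesE (p : Bool) : List (String × Bool) → List Int
  | [] => []
  | (w, a) :: r => if !a && p then pvHour w :: edgesE a r else edgesE a r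

-- zip truncates, so dropping the last shifted flag changes nothing
theorem zipPrev : ∀ (l : List (String × Bool)) (p : Bool),
    l.zip (p :: (l.map (·.2)).dropLast) = l.zip (p :: l.map (·.2)) := by
  intro l
  induction l with
  | nil => intro p; rfl
  | cons x r ih =>
    intro p
    cases r with
    | nil => rfl
    | cons y s =>
      have h := ih x.2
      simp only [List.map_cons, List.dropLast_cons₂, List.zip_cons_cons] at h ⊢
      exact congrArg (List.cons (x, p)) h

theorem startsEq : ∀ (l : List (String × Bool)) (p : Bool),
    (l.zip (p :: l.map (·.2))).filterMap
      (fun x => if x.1.2 && !x.2 then some (pvHour x.1.1) else none) = edgesS p l := by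
  intro l
  induction l with
  | nil => intro p; rfl
  | cons x r ih =>
    intro p
    obtain ⟨w, a⟩ := x
    simp only [List.map_cons, List.zip_cons_cons, List.filterMap_cons, edgesS]
    cases h : (a && !p) <;> simpa [h] using ih a

theorem endsEq : ∀ (l : List (String × Bool)) (p : Bool),
    (l.zip (p :: l.map (·.2))).filterMap
      (fun x => if !x.1.2 && x.2 then some (pvHour x.1.1) else none) = edgesE p l := by
  intro l
  induction l with
  | nil => intro p; rfl
  | cons x r ih =>
    intro p
    obtain ⟨w, a⟩ := x
    simp only [List.map_cons, List.zip_cons_cons, List.filterMap_cons, edgesE]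
    cases h : (!a && p) <;> simpa [h] using ih a

-- pairing of the two edge lists, as in B
def mkIv (s e : List Int) : List (List Int) :=
  (s.zip (if e.length < s.length then e ++ [24] else e)).map (fun p => [p.1, p.2])

theorem mkIv_cons (t h : Int) (S E : List Int) :
    mkIv (t :: S) (h :: E) = [t, h] :: mkIv S E := by
  unfold mkIv
  by_cases hl : E.length < S.length <;> simp [hl]

-- the staged edge pairing computes exactly the run recursion
theorem edges_scan (l : List (String × Bool)) :
    mkIv (edgesS false l) (edgesE false l) = pvScan l ∧
    ∀ t, mkIv (t :: edgesS true l) (edgesE true l) = pvRun t l := by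
  induction l with
  | nil => exact ⟨rfl, fun t => by simp [edgesS, edgesE, mkIv, pvRun]⟩
  | cons x r ih =>
    obtain ⟨w, a⟩ := x
    cases a with
    | false =>
      refine ⟨?_, fun t => ?_⟩
      · simpa [edgesS, edgesE, pvScan] using ih.1
      · simp only [edgesS, edgesE, pvRun]
        norm_num
        rw [mkIv_cons, ih.1]
    | true =>
      refine ⟨?_, fun t => ?_⟩
      · simp only [edgesS, edgesE, pvScan]
        norm_num
        exact ih.2 (pvHour w)
      · simpa [edgesS, edgesE, pvRun] using ih.2 t

-- ===== VERDICT (by name: the statement is the Claim_ definition above) =====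
theorem convert_usage_windows_spec : Claim_equal_convert_usage_windows := by
  intro d _ _
  unfold Spec_convert_usage_windows
  have hA : convert_usage_windows d
      = pvFinish ((PySem.Dict.ofList d).items.foldl pvStep ([], none)) := rfl
  have hB : convert_usage_windows_alt d
      = mkIv (edgesS false (PySem.Dict.ofList d).items)
             (edgesE false (PySem.Dict.ofList d).items) := by
    simp only [convert_usage_windows_alt, mkIv, zipPrev, startsEq, endsEq]
  rw [hA, (pvLoop _).1 [], hB, (edges_scan _).1]
  rfl
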